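-- pv_equiv track=rewrite | github.com/redgy/adventofcode | 2023/days/day09.py | fill_extrapolated_values
-- ===== SOURCE A (Python) =====
-- def fill_extrapolated_values(arr_map: list) -> list:
--     """Fills extrapolated values in list of lists"""
--     last_row = len(arr_map)-1
--     last_list = arr_map[last_row]
--     last_list.append(0)
--
--     for index, value in enumerate(arr_map, start=1):
--         current_index = last_row - index
--         if current_index == -1:
--             continue
--         current_list = arr_map[current_index]
--         previous_list = arr_map[current_index+1]
--         extrapolated_value = current_list[-1] + previous_list[-1]
--         current_list.append(extrapolated_value)
--     return arr_map
-- ===== SOURCE B (Python) =====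
-- def fill_extrapolated_values(arr_map: list) -> list:
--     """Fills extrapolated values in list of lists"""
--     lasts = [row[-1] for row in arr_map[:-1]]
--     suffix = [0]
--     for x in reversed(lasts):
--         suffix.append(suffix[-1] + x)
--     suffix.reverse()
--     for row, v in zip(arr_map, suffix):
--         row.append(v)
--     return arr_map
-- ===== Notes on version B (the rewrite author's own statement) =====
-- stated objective: alternative
-- what changed: B is staged: it first collects the original last elements of all rows except the bottom one, builds a suffix-sum table from them (each row's extrapolated value is the sum of the original lasts of the rows below-or-at it, excluding the bottom row), and then appends the table entries to the rows in one zip pass, instead of A's single in-place pass that re-reads each freshly appended value back out of the array.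
import Mathlib
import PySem

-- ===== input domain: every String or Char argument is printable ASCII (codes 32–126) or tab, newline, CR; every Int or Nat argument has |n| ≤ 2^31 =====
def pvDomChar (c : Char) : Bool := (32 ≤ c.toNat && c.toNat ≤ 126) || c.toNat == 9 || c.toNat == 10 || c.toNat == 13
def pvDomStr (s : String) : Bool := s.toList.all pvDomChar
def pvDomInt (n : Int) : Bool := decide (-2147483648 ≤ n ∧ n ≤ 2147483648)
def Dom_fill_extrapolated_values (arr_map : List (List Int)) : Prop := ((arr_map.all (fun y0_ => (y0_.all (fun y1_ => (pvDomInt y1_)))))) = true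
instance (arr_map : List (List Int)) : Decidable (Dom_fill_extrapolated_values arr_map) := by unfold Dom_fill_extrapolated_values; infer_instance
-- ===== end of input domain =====

-- B is a staged re-implementation: collect the original last elements of the non-bottom rows,
-- build a suffix-sum table from them, then append the table entries in one zip pass — instead
-- of A's single in-place pass re-reading freshly appended values (objective: alternative).
-- Both Pythons mutate arr_map in place identically; the ports model the returned value.

-- ===== PORT A =====
-- one iteration of A's for-loop over enumerate(arr_map, start=1); `lr` is last_row
def stepA (lr : Int) (arr : List (List Int)) (idx0 : Nat) : List (List Int) :=
  let index : Int := (idx0 : Int) + 1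
  let current_index : Int := lr - index
  if current_index = -1 then arr
  else
    match PySem.List.pyGet? arr current_index, PySem.List.pyGet? arr (current_index + 1) with
    | some current_list, some previous_list =>
      match PySem.List.pyGet? current_list (-1), PySem.List.pyGet? previous_list (-1) with
      | some c, some p => arr.set current_index.toNat (current_list ++ [c + p])
      | _, _ => arr              -- IndexError (empty row); excluded by Pre_
    | _, _ => arr                -- unreachable for in-range current_index
def fill_extrapolated_values (arr_map : List (List Int)) : List (List Int) :=
  let last_row : Int := (arr_map.length : Int) - 1
  let arr1 : List (List Int) :=
    match PySem.List.pyGet? arr_map last_row with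
    | none => arr_map            -- IndexError (empty arr_map); excluded by Pre_
    | some last_list => arr_map.set (arr_map.length - 1) (last_list ++ [0])
  (List.range arr_map.length).foldl (stepA last_row) arr1

-- ===== PORT B =====
-- the loop 'for x in reversed(lasts): suffix.append(suffix[-1] + x)'
def buildSuffix (xs : List Int) (s : List Int) : List Int :=
  xs.foldl (fun s x => s ++ [(PySem.List.pyGet? s (-1)).getD 0 + x]) s
def fill_extrapolated_values_alt (arr_map : List (List Int)) : List (List Int) :=
  let lasts : List Int :=
    (PySem.List.slice arr_map none (some (-1))).map
      (fun row => (PySem.List.pyGet? row (-1)).getD 0)   -- IndexError on empty non-bottom row; excluded by Pre_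
  let suffix : List Int := buildSuffix lasts.reverse [0]
  let suffixRev : List Int := suffix.reverse
  List.zipWith (fun row v => row ++ [v]) arr_map suffixRev

-- ===== PRECONDITION & SPEC =====
-- Pre_ excludes exactly the inputs on which A raises IndexError: the empty list (arr_map[-1])
-- and any empty row other than the last one (current_list[-1] / previous_list[-1]).
def Pre_fill_extrapolated_values (arr_map : List (List Int)) : Prop :=
  arr_map ≠ [] ∧ ∀ row ∈ arr_map.dropLast, row ≠ []
instance (arr_map : List (List Int)) : Decidable (Pre_fill_extrapolated_values arr_map) := by
  unfold Pre_fill_extrapolated_values; infer_instance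
def pvWitness_fill_extrapolated_values : List (List Int) := [[1, 3, 6], [2, 3], [1]]

def Spec_fill_extrapolated_values (arr_map : List (List Int)) (out : List (List Int)) : Prop := out = fill_extrapolated_values_alt arr_map
instance (arr_map : List (List Int)) (out : List (List Int)) : Decidable (Spec_fill_extrapolated_values arr_map out) := by unfold Spec_fill_extrapolated_values; infer_instance

-- ===== CLAIM (what is proved, stated in full; the proofs are below) =====
def Claim_equal_fill_extrapolated_values : Prop := ∀ (arr_map : List (List Int)), Dom_fill_extrapolated_values arr_map → Pre_fill_extrapolated_values arr_map → Spec_fill_extrapolated_values arr_map (fill_extrapolated_values arr_map)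

-- ===== LEMMAS AND PROOFS =====

-- original-last of a row, as B reads it
def lastOf (row : List Int) : Int := (PySem.List.pyGet? row (-1)).getD 0

-- reference: process rows top-down; seed e is the extrapolated value of the row below the segment;
-- returns (filled rows, extrapolated value of the segment's top row, or e if empty)
def gAux : List (List Int) → Int → List (List Int) × Int
  | [], e => ([], e)
  | row :: rest, e =>
    let r := gAux rest e
    let v := lastOf row + r.2
    ((row ++ [v]) :: r.1, v)

-- running sums of ys starting from a (the values suffix.append produces)
def accs (a : Int) : List Int → List Int
  | [] => []
  | y :: ys => (a + y) :: accs (a + y) ys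

lemma buildSuffix_eq (ys : List Int) : ∀ (s : List Int) (a : Int),
    PySem.List.pyGet? s (-1) = some a → buildSuffix ys s = s ++ accs a ys := by
  induction ys with
  | nil => intro s a _; simp [buildSuffix, accs]
  | cons y ys ih =>
    intro s a ha
    simp only [buildSuffix, List.foldl_cons, accs] at *
    rw [ha, Option.getD_some]
    have h2 : PySem.List.pyGet? (s ++ [a + y]) (-1) = some (a + y) :=
      PySem.List.pyGet?_neg_one_append_singleton _ _
    rw [ih _ _ h2]
    simp

lemma accs_append (a : Int) (xs : List Int) (y : Int) :
    accs a (xs ++ [y]) = accs a xs ++ [a + xs.sum + y] := by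
  induction xs generalizing a with
  | nil => simp [accs]
  | cons x xs ih => simp [accs, ih]; ring_nf

-- the suffix-sum table B appends, row by row
def vals (T : List (List Int)) : List Int := (accs 0 (T.map lastOf).reverse).reverse

lemma vals_cons (row : List Int) (rest : List (List Int)) :
    vals (row :: rest) = (lastOf row + (rest.map lastOf).sum) :: vals rest := by
  simp only [vals, List.map_cons, List.reverse_cons, accs_append, List.reverse_append,
    List.reverse_cons, List.reverse_nil, List.nil_append, List.sum_reverse]
  simp [add_comm]

lemma gAux_snd (T : List (List Int)) : (gAux T 0).2 = (T.map lastOf).sum := by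
  induction T with
  | nil => simp [gAux]
  | cons row rest ih => simp [gAux, ih]

lemma zip_vals (T : List (List Int)) :
    List.zipWith (fun row v => row ++ [v]) T (vals T) = (gAux T 0).1 := by
  induction T with
  | nil => simp [vals, accs, gAux]
  | cons row rest ih =>
    rw [vals_cons]
    simp only [List.zipWith_cons_cons, ih, gAux, gAux_snd]

lemma vals_length (T : List (List Int)) : (vals T).length = T.length := by
  induction T with
  | nil => simp [vals, accs]
  | cons row rest ih => rw [vals_cons]; simp [ih]

lemma alt_eq (T : List (List Int)) (b : List Int) :
    fill_extrapolated_values_alt (T ++ [b]) = (gAux T 0).1 ++ [b ++ [0]] := by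
  simp only [fill_extrapolated_values_alt]
  rw [PySem.List.slice_to_neg_one, List.dropLast_concat]
  have h0 : PySem.List.pyGet? ([0] : List Int) (-1) = some 0 := by decide
  rw [buildSuffix_eq _ _ _ h0]
  have hv : (([0] ++ accs 0 ((T.map (fun row => (PySem.List.pyGet? row (-1)).getD 0)).reverse)).reverse : List Int)
      = vals T ++ [0] := by
    simp only [List.cons_append, List.nil_append, List.reverse_cons]
    simp [vals]
    rfl
  rw [hv, List.zipWith_append (h := by rw [vals_length]), zip_vals]
  simp

lemma set_snoc {α : Type} (xs : List α) (x y : α) (i : Nat) (h : i = xs.length) :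
    (xs ++ [x]).set i y = xs ++ [y] := by
  subst h; rw [List.set_append_right _ _ (le_refl _)]; simp

lemma gAux_head_last (S : List (List Int)) (b : List Int) :
    ∃ q, ((gAux S 0).1 ++ [b ++ [0]])[0]? = some q ∧
      PySem.List.pyGet? q (-1) = some (gAux S 0).2 := by
  cases S with
  | nil => exact ⟨b ++ [0], by simp [gAux], by simp [gAux, PySem.List.pyGet?_neg_one_append_singleton]⟩
  | cons r rest =>
    refine ⟨r ++ [lastOf r + (gAux rest 0).2], ?_, ?_⟩
    · simp [gAux]
    · simp [gAux, PySem.List.pyGet?_neg_one_append_singleton]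

lemma foldl_inv (T : List (List Int)) (b : List Int) (hT : ∀ row ∈ T, row ≠ []) :
    ∀ k, k ≤ T.length →
      (List.range k).foldl (stepA (T.length : Int)) (T ++ [b ++ [0]])
        = T.take (T.length - k) ++ (gAux (T.drop (T.length - k)) 0).1 ++ [b ++ [0]] := by
  intro k
  induction k with
  | zero => intro _; simp [gAux]
  | succ k ih =>
    intro hk
    have hk' : k ≤ T.length := by omega
    rw [List.range_succ, List.foldl_append, ih hk']
    simp only [List.append_assoc]
    set m := T.length with hm
    have hkm : k < m := by omega
    have hlenP : (T.take (m - k)).length = m - k := by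
      rw [List.length_take]; omega
    obtain ⟨q, hq0, hqlast⟩ := gAux_head_last (T.drop (m - k)) b
    have him : m - k - 1 < m := by omega
    have hTne : T[m - k - 1]'(by omega) ≠ [] := hT _ (List.getElem_mem _)
    simp only [List.foldl_cons, List.foldl_nil, stepA]
    have hci : ¬ ((m : Int) - ((k : Int) + 1) = -1) := by omega
    rw [if_neg hci]
    have e1 : ((m : Int) - ((k : Int) + 1)) = ((m - k - 1 : Nat) : Int) := by omega
    have e2 : ((m - k - 1 : Nat) : Int) + 1 = ((m - k : Nat) : Int) := by omega
    rw [e1, e2, PySem.List.pyGet?_natCast, PySem.List.pyGet?_natCast]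
    have hg1 : (T.take (m - k) ++ ((gAux (T.drop (m - k)) 0).1 ++ [b ++ [0]]))[m - k - 1]?
        = some (T[m - k - 1]'(by omega)) := by
      rw [List.getElem?_append_left (by omega), List.getElem?_take_of_lt (by omega)]
      exact List.getElem?_eq_getElem him
    have hg2 : (T.take (m - k) ++ ((gAux (T.drop (m - k)) 0).1 ++ [b ++ [0]]))[m - k]?
        = some q := by
      rw [List.getElem?_append_right (by omega)]
      have hz : m - k - (T.take (m - k)).length = 0 := by omega
      rw [hz]; exact hq0
    have hc : PySem.List.pyGet? (T[m - k - 1]'(by omega)) (-1)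
        = some ((T[m - k - 1]'(by omega)).getLast hTne) := by
      rw [PySem.List.pyGet?_neg_one, List.getLast?_eq_some_getLast]
    rw [hg1, hg2]
    simp only [hc, hqlast]
    have htn : ((m - k - 1 : Nat) : Int).toNat = m - k - 1 := by omega
    rw [htn]
    -- perform the set on the prefix
    rw [List.set_append_left _ _ (by omega)]
    have htake : T.take (m - k) = T.take (m - k - 1) ++ [T[m - k - 1]'(by omega)] := by
      have h2 : m - k = (m - k - 1) + 1 := by omega
      conv_lhs => rw [h2]
      exact List.take_succ_eq_append_getElem (by omega)
    have hset : (T.take (m - k)).set (m - k - 1)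
        (T[m - k - 1]'(by omega) ++ [(T[m - k - 1]'(by omega)).getLast hTne + (gAux (T.drop (m - k)) 0).2])
        = T.take (m - k - 1) ++ [T[m - k - 1]'(by omega) ++ [(T[m - k - 1]'(by omega)).getLast hTne + (gAux (T.drop (m - k)) 0).2]] := by
      rw [htake]
      exact set_snoc _ _ _ _ (by rw [List.length_take]; omega)
    rw [hset]
    -- rebuild the right-hand side
    have hdrop : T.drop (m - (k + 1)) = T[m - k - 1]'(by omega) :: T.drop (m - k) := by
      have hd := List.drop_eq_getElem_cons (l := T) (i := m - k - 1) (by omega)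
      rw [show m - (k + 1) = m - k - 1 from by omega, hd,
        show m - k - 1 + 1 = m - k from by omega]
    rw [hdrop]
    have hlast : lastOf (T[m - k - 1]'(by omega))
        = (T[m - k - 1]'(by omega)).getLast hTne := by
      rw [lastOf, PySem.List.pyGet?_neg_one, List.getLast?_eq_some_getLast hTne]; rfl
    have h1 : m - (k + 1) = m - k - 1 := by omega
    simp only [gAux, hlast, h1]
    simp

-- ===== VERDICT =====
theorem fill_extrapolated_values_spec : Claim_equal_fill_extrapolated_values := by
  intro arr _ hpre
  obtain ⟨hne, hrows⟩ := hpre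
  unfold Spec_fill_extrapolated_values
  obtain ⟨T, b, rfl⟩ : ∃ T b, arr = T ++ [b] :=
    ⟨arr.dropLast, arr.getLast hne, (List.dropLast_append_getLast hne).symm⟩
  have hT : ∀ row ∈ T, row ≠ [] := by
    intro r hr
    exact hrows r (by rwa [List.dropLast_concat])
  rw [alt_eq]
  simp only [fill_extrapolated_values]
  have hlr : (((T ++ [b]).length : Nat) : Int) - 1 = ((T.length : Nat) : Int) := by
    simp
  rw [hlr]
  simp only [PySem.List.pyGet?_natCast, List.getElem?_concat_length]
  have hl1 : (T ++ [b]).length - 1 = T.length := by simp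
  rw [hl1, set_snoc T b (b ++ [0]) T.length rfl]
  rw [show (T ++ [b]).length = T.length + 1 from by simp, List.range_succ,
    List.foldl_append, foldl_inv T b hT T.length (le_refl _)]
  simp only [Nat.sub_self, List.take_zero, List.drop_zero, List.nil_append,
    List.foldl_cons, List.foldl_nil, stepA]
  rw [if_pos (by omega)]
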